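-- pv_equiv track=rewrite | github.com/yogan/advent-of-code | 2024/day-23-python/aoc.py | extend_cliques
-- ===== SOURCE A (Python) =====
-- def extend_cliques(cliques, E, V):
--     extended_cliques = set()
--
--     for clique in cliques:
--         for a in V:
--             if a not in clique:
--                 if all((b, a) in E for b in clique):
--                     extended_cliques.add(tuple(sorted(clique + (a,))))
--
--     return extended_cliques
-- ===== SOURCE B (Python) =====
-- def extend_cliques(cliques, E, V):
--     # Adjacency index built once: succ[b] = all a with (b, a) in E.
--     succ = {}
--     for (x, y) in E:
--         succ.setdefault(x, set()).add(y)
--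
--     vs = set(V)
--     extended = set()
--     for clique in cliques:
--         # vertices adjacent to every member of the clique
--         cands = vs
--         for b in clique:
--             cands = cands & succ.get(b, set())
--         for a in V:
--             if a in cands and a not in clique:
--                 extended.add(tuple(sorted(clique + (a,))))
--     return extended
-- ===== Notes on version B (the rewrite author's own statement) =====
-- stated objective: faster
-- what changed: B builds an adjacency dict from E once and computes, per clique, the candidate set by intersecting the members' neighbor sets, replacing A's inner all-scan over E for every (clique, vertex) pair.
import Mathlib
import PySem

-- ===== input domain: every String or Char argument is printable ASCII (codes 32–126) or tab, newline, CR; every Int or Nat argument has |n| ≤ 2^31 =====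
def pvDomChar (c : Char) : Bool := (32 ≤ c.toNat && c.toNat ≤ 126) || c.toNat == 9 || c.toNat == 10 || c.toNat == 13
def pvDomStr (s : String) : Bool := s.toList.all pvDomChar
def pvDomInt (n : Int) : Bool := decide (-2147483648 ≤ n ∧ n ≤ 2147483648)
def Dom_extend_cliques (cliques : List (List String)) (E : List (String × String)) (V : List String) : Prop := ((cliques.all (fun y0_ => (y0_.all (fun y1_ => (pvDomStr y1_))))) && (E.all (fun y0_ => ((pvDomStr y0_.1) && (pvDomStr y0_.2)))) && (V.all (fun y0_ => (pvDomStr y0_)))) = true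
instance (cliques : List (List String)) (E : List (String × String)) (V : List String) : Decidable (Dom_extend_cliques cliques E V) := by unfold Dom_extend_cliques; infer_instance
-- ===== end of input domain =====

-- B replaces A's inner all-scan over E by an adjacency dict built once plus per-clique
-- set intersection of the members' neighbor sets (objective: faster).
-- Both Pythons return a set; the ports build it in the same deterministic insertion order.

-- ===== PORT A =====
def extend_cliques (cliques : List (List String)) (E : List (String × String)) (V : List String) : List (List String) :=
  cliques.foldl (fun extended clique =>
    V.foldl (fun extended a =>
      if a ∉ clique then
        if clique.all (fun b => decide ((b, a) ∈ E)) then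
          PySem.Set.add extended (PySem.List.sorted (clique ++ [a]) (fun x => x) false)
        else extended
      else extended) extended) PySem.Set.empty

-- ===== PORT B =====
def extend_cliques_alt (cliques : List (List String)) (E : List (String × String)) (V : List String) : List (List String) :=
  let succ : PySem.Dict String (PySem.Set String) :=
    E.foldl (fun d p => d.insert p.1 (PySem.Set.add (d.getD p.1 PySem.Set.empty) p.2)) PySem.Dict.empty
  let vs : PySem.Set String := PySem.Set.ofList V
  cliques.foldl (fun extended clique =>
    let cands : PySem.Set String :=
      clique.foldl (fun c b => PySem.Set.inter c (succ.getD b PySem.Set.empty)) vs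
    V.foldl (fun extended a =>
      if a ∈ cands ∧ a ∉ clique then
        PySem.Set.add extended (PySem.List.sorted (clique ++ [a]) (fun x => x) false)
      else extended) extended) PySem.Set.empty

-- ===== PRECONDITION & SPEC =====
def Spec_extend_cliques (cliques : List (List String)) (E : List (String × String)) (V : List String) (out : List (List String)) : Prop := out = extend_cliques_alt cliques E V
instance (cliques : List (List String)) (E : List (String × String)) (V : List String) (out : List (List String)) : Decidable (Spec_extend_cliques cliques E V out) := by unfold Spec_extend_cliques; infer_instance

-- ===== CLAIM (what is proved, stated in full; the proofs are below) =====
def Claim_equal_extend_cliques : Prop := ∀ (cliques : List (List String)) (E : List (String × String)) (V : List String), Dom_extend_cliques cliques E V → Spec_extend_cliques cliques E V (extend_cliques cliques E V)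

-- ===== LEMMAS AND PROOFS =====

-- membership in the adjacency dict built by B: a is in succ[b] iff (b, a) is in E
theorem pv_mem_succ (E : List (String × String)) (d : PySem.Dict String (PySem.Set String)) (b a : String) :
    a ∈ (E.foldl (fun d p => d.insert p.1 (PySem.Set.add (d.getD p.1 PySem.Set.empty) p.2)) d).getD b PySem.Set.empty
      ↔ (b, a) ∈ E ∨ a ∈ d.getD b PySem.Set.empty := by
  induction E generalizing d with
  | nil => simp
  | cons p rest ih =>
    obtain ⟨x, y⟩ := p
    simp only [List.foldl_cons, ih, List.mem_cons]
    by_cases hb : x = b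
    · subst hb
      rw [show (d.insert x (PySem.Set.add (d.getD x PySem.Set.empty) y)).getD x PySem.Set.empty
            = PySem.Set.add (d.getD x PySem.Set.empty) y by
          simp [PySem.Dict.getD, PySem.Dict.get?_insert_self]]
      rw [PySem.Set.mem_add]
      simp only [Prod.mk.injEq, true_and]
      tauto
    · rw [show (d.insert x (PySem.Set.add (d.getD x PySem.Set.empty) y)).getD b PySem.Set.empty
            = d.getD b PySem.Set.empty by
          simp [PySem.Dict.getD, PySem.Dict.get?_insert_of_ne _ _ (fun h => hb h.symm)]]
      have hne : (b, a) ≠ (x, y) := fun h => hb (by cases h; rfl)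
      simp only [Prod.mk.injEq]
      constructor
      · rintro (h | h)
        · exact Or.inl (Or.inr h)
        · exact Or.inr h
      · rintro ((⟨h1, h2⟩ | h) | h)
        · exact absurd h1.symm hb
        · exact Or.inl h
        · exact Or.inr h

-- membership in B's candidate set accumulated by intersection
theorem pv_mem_cands (clique : List String) (succ : PySem.Dict String (PySem.Set String)) (c : PySem.Set String) (a : String) :
    a ∈ clique.foldl (fun c b => PySem.Set.inter c (succ.getD b PySem.Set.empty)) c
      ↔ a ∈ c ∧ ∀ b ∈ clique, a ∈ succ.getD b PySem.Set.empty := by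
  induction clique generalizing c with
  | nil => simp
  | cons b rest ih =>
    simp only [List.foldl_cons, ih, PySem.Set.mem_inter, List.mem_cons]
    constructor
    · rintro ⟨⟨h1, h2⟩, h3⟩
      exact ⟨h1, fun x hx => hx.elim (fun e => e ▸ h2) (h3 x)⟩
    · rintro ⟨h1, h2⟩
      exact ⟨⟨h1, h2 b (Or.inl rfl)⟩, fun x hx => h2 x (Or.inr hx)⟩

-- a vertex of V lies in B's candidate set iff it is adjacent to every clique member
theorem pv_cands_iff (E : List (String × String)) (clique V : List String) (a : String) (ha : a ∈ V) :
    a ∈ clique.foldl (fun c b => PySem.Set.inter c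
        ((E.foldl (fun d p => d.insert p.1 (PySem.Set.add (d.getD p.1 PySem.Set.empty) p.2)) PySem.Dict.empty).getD b PySem.Set.empty))
        (PySem.Set.ofList V)
      ↔ ∀ b ∈ clique, (b, a) ∈ E := by
  rw [pv_mem_cands]
  constructor
  · rintro ⟨-, h⟩ b hb
    rcases (pv_mem_succ E PySem.Dict.empty b a).mp (h b hb) with h' | h'
    · exact h'
    · simp [PySem.Dict.getD, PySem.Dict.get?, PySem.Dict.empty, PySem.Set.empty] at h'
  · intro h
    refine ⟨by simpa [PySem.Set.mem_ofList] using ha,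
      fun b hb => (pv_mem_succ E PySem.Dict.empty b a).mpr (Or.inl (h b hb))⟩

-- ===== VERDICT (by name: the statement is the Claim_ definition above) =====
theorem extend_cliques_spec : Claim_equal_extend_cliques := by
  intro cliques E V _
  unfold Spec_extend_cliques extend_cliques extend_cliques_alt
  simp only []
  congr 1
  funext extended clique
  apply PySem.List.foldl_congr_mem
  intro acc a ha
  by_cases hm : a ∈ clique
  · simp [hm]
  · rw [if_pos hm]
    by_cases hall : ∀ b ∈ clique, (b, a) ∈ E
    · rw [if_pos (by simpa [List.all_eq_true] using hall),
         if_pos ⟨(pv_cands_iff E clique V a ha).mpr hall, hm⟩]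
    · rw [if_neg (by simpa [List.all_eq_true] using hall),
         if_neg (fun h => hall ((pv_cands_iff E clique V a ha).mp h.1))]
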